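-- pv_equiv track=rewrite | github.com/RivenKid69/crm-sales-bot-fork | knowledge_extractor/knowledge_extractor/extraction/keyword_generator.py | _missing_letter_typos
-- ===== SOURCE A (Python) =====
-- from typing import List, Optional, Set
--
-- def _missing_letter_typos(word: str) -> List[str]:
--     """Generate typos with missing letters."""
--     typos = []
--     if len(word) < 4:
--         return typos
--
--     # Skip first and last letter
--     for i in range(1, len(word) - 1):
--         typo = word[:i] + word[i + 1:]
--         typos.append(typo)
--
--     return typos[:2]
-- ===== SOURCE B (Python) =====
-- def _missing_letter_typos(word: str):
--     """Generate typos with missing letters (first two directly, no loop)."""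
--     if len(word) < 4:
--         return []
--     return [word[:1] + word[2:], word[:2] + word[3:]]
-- ===== Notes on version B (the rewrite author's own statement) =====
-- stated objective: simpler
-- what changed: Replaces the O(n) loop building every interior-deletion typo (then truncated with [:2]) by directly constructing the two kept typos (delete index 1 and index 2) with four fixed slices.
import Mathlib
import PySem

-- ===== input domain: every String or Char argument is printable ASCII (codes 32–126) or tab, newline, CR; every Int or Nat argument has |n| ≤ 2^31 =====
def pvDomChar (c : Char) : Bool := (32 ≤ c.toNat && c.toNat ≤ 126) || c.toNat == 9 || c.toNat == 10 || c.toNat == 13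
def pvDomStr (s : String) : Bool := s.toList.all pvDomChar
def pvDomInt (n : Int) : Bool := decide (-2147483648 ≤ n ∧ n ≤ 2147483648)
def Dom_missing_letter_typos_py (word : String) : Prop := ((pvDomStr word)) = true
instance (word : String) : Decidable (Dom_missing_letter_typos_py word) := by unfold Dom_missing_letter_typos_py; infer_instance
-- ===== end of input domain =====

-- B replaces A's loop over all interior deletion positions (then truncated with [:2]) by
-- directly building the two kept typos with constant slicing; objective: simpler.

-- ===== PORT A =====
def missing_letter_typos_py (word : String) : List String :=
  let typos : List String := []
  if PySem.Str.len word < 4 then typos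
  else
    let typos := (PySem.List.pyRange 1 (PySem.Str.len word - 1) 1).foldl
      (fun acc i => acc ++ [String.ofList (PySem.List.slice word.toList none (some i) ++
                                       PySem.List.slice word.toList (some (i + 1)) none)]) typos
    PySem.List.slice typos none (some 2)

-- ===== PORT B =====
def missing_letter_typos_py_alt (word : String) : List String :=
  if PySem.Str.len word < 4 then []
  else [String.ofList (PySem.List.slice word.toList none (some 1) ++
                   PySem.List.slice word.toList (some 2) none),
        String.ofList (PySem.List.slice word.toList none (some 2) ++
                   PySem.List.slice word.toList (some 3) none)]

-- ===== PRECONDITION & SPEC =====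
def Spec_missing_letter_typos_py (word : String) (out : List String) : Prop := out = missing_letter_typos_py_alt word
instance (word : String) (out : List String) : Decidable (Spec_missing_letter_typos_py word out) := by unfold Spec_missing_letter_typos_py; infer_instance

-- ===== CLAIM (what is proved, stated in full; the proofs are below) =====
def Claim_equal_missing_letter_typos_py : Prop := ∀ (word : String), Dom_missing_letter_typos_py word → Spec_missing_letter_typos_py word (missing_letter_typos_py word)

-- ===== LEMMAS AND PROOFS =====

theorem missing_letter_typos_eq (word : String) :
    missing_letter_typos_py word = missing_letter_typos_py_alt word := by
  unfold missing_letter_typos_py missing_letter_typos_py_alt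
  by_cases h : PySem.Str.len word < 4
  · rw [if_pos h, if_pos h]
  · rw [if_neg h, if_neg h]
    have h1 : (1 : Int) < PySem.Str.len word - 1 := by omega
    rw [PySem.List.pyRange_one_cons h1, PySem.List.pyRange_one_cons (by omega : (1:Int)+1 < PySem.Str.len word - 1)]
    rw [PySem.List.foldl_append_singleton_eq_map]
    rw [show ((2:Int)) = ((2:Nat):Int) from rfl, PySem.List.slice_to_natCast]
    norm_num [List.take]

-- ===== VERDICT (by name: the statement is the Claim_ definition above) =====
theorem missing_letter_typos_py_spec : Claim_equal_missing_letter_typos_py := by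
  intro word _
  unfold Spec_missing_letter_typos_py
  exact missing_letter_typos_eq word
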